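-- pv_equiv track=rewrite | github.com/wangzehui20/semantic-segmentation | datasets/dataset_pre_post/preprocess_align.py | get_cliplist
-- ===== SOURCE A (Python) =====
-- def get_cliplist(width, height, clipw, cliph, overlap):
--     start_w = 0
--     start_h = 0
--     end_w = clipw
--     end_h = cliph
--     crop_box_list = []
--     while start_h < height:
--         if end_h > height:
--             end_h = height
--         while start_w < width:
--             if end_w > width:
--                 end_w = width
--             crop_box_list.append([start_h, end_h, start_w, end_w])
--             if end_w == width: break
--             start_w = end_w - overlap
--             end_w = start_w + clipw
--         if end_h == height: break
--         start_h = end_h - overlap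
--         end_h = start_h + cliph
--         start_w = 0
--         end_w = clipw
--     return crop_box_list
-- ===== SOURCE B (Python) =====
-- def get_cliplist(width, height, clipw, cliph, overlap):
--     # Closed form: compute the number of tiles per axis by ceiling division,
--     # then materialize every box arithmetically (no stepping loop state).
--     def spans(length, clip):
--         if length <= 0:
--             return []
--         if clip >= length:
--             return [(0, length)]
--         step = clip - overlap
--         if step <= 0:
--             raise ValueError("non-positive stride")
--         kb = -((clip - length) // step)   # ceil((length-clip)/step): first clamped tile index
--         kg = -((-length) // step)         # ceil(length/step): first start position >= length
--         if kb < kg: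
--             return [(i * step, i * step + clip) for i in range(kb)] + [(kb * step, length)]
--         return [(i * step, i * step + clip) for i in range(kg)]
--     return [[sh, eh, sw, ew]
--             for sh, eh in spans(height, cliph)
--             for sw, ew in spans(width, clipw)]
-- ===== Notes on version B (the rewrite author's own statement) =====
-- stated objective: alternative
-- what changed: A steps mutable start/end state through an interleaved double while-loop; B computes the number of tiles per axis in closed form by ceiling division (kb = first clamped tile index, kg = first start >= length) and materializes every interval arithmetically from its index via range(), then combines the two axes; no stepping loop state remains.
import Mathlib
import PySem

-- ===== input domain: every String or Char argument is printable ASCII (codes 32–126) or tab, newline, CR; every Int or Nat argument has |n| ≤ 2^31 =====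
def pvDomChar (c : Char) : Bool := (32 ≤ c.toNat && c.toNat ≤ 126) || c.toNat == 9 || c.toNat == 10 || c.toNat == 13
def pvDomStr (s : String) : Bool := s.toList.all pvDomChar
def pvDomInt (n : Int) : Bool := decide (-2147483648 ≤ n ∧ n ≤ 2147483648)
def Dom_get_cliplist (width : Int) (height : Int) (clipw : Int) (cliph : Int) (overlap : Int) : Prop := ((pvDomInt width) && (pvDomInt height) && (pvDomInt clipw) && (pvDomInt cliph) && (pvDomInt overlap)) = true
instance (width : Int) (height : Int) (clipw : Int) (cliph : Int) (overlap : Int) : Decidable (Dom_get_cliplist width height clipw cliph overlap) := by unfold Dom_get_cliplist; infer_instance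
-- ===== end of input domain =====

-- B replaces A's interleaved stateful double while-loop by a closed form: per axis the number
-- of tiles is computed by ceiling division and each interval is materialized arithmetically
-- from its index (objective: alternative, same cost). Pre_ excludes exactly the inputs on
-- which A's while-loops never terminate (there B raises ValueError).


-- Fuel for A's two while-loops: inside Dom every terminating run makes progress ≥ 1 per
-- iteration from start 0 toward a bound ≤ 2^31, so 2^40 steps are never exhausted there.
def pvFuel : Nat := 2 ^ 40

-- ===== PORT A =====
-- inner 'while start_w < width' of A for a fixed row (sh, eh); acc is the shared
-- crop_box_list in reversed order (tail-recursive; reversed once at the end)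
def pvInnerA (width clipw overlap sh eh : Int) : Nat → Int → Int → List (List Int) → List (List Int)
  | 0, _, _, acc => acc
  | f + 1, sw, ew, acc =>
    if sw < width then
      let ew' := if ew > width then width else ew
      let acc' := [sh, eh, sw, ew'] :: acc
      if ew' = width then acc'
      else pvInnerA width clipw overlap sh eh f (ew' - overlap) (ew' - overlap + clipw) acc'
    else acc

-- outer 'while start_h < height' of A (start_w, end_w reset to 0, clipw on each pass)
def pvOuterA (width height clipw cliph overlap : Int) : Nat → Int → Int → List (List Int) → List (List Int)
  | 0, _, _, acc => acc
  | g + 1, sh, eh, acc =>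
    if sh < height then
      let eh' := if eh > height then height else eh
      let acc' := pvInnerA width clipw overlap sh eh' pvFuel 0 clipw acc
      if eh' = height then acc'
      else pvOuterA width height clipw cliph overlap g (eh' - overlap) (eh' - overlap + cliph) acc'
    else acc

def get_cliplist (width : Int) (height : Int) (clipw : Int) (cliph : Int) (overlap : Int) : List (List Int) :=
  (pvOuterA width height clipw cliph overlap pvFuel 0 cliph []).reverse

-- ===== PORT B =====
-- B's helper spans(length, clip): closed-form interval list of one axis.
-- kb = ceil((length-clip)/step) is the index of the first clamped tile, kg = ceil(length/step)
-- the first index whose start is ≥ length; Python's '-((a) // step)' is -(floordiv a step).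
-- Where B raises ValueError (step ≤ 0 on a non-degenerate axis; outside Pre_) the port returns [].
def pvSpans (length clip overlap : Int) : List (Int × Int) :=
  if length ≤ 0 then []
  else if clip ≥ length then [(0, length)]
  else
    let step := clip - overlap
    if step ≤ 0 then []
    else
      let kb := -(PySem.Int.floordiv (clip - length) step)
      let kg := -(PySem.Int.floordiv (-length) step)
      if kb < kg then
        (List.range kb.toNat).map (fun i => ((i : Int) * step, (i : Int) * step + clip))
          ++ [(kb * step, length)]
      else
        (List.range kg.toNat).map (fun i => ((i : Int) * step, (i : Int) * step + clip))

def get_cliplist_alt (width : Int) (height : Int) (clipw : Int) (cliph : Int) (overlap : Int) : List (List Int) :=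
  (pvSpans height cliph overlap).flatMap (fun p =>
    (pvSpans width clipw overlap).map (fun q => [p.1, p.2, q.1, q.2]))

-- ===== PRECONDITION & SPEC =====
-- Pre_ excludes exactly the inputs on which Python A loops forever (height > 0 with a
-- non-positive stride on a still-unclamped axis); B raises ValueError there.
def Pre_get_cliplist (width : Int) (height : Int) (clipw : Int) (cliph : Int) (overlap : Int) : Prop :=
  height ≤ 0 ∨ ((cliph ≥ height ∨ overlap < cliph) ∧ (width ≤ 0 ∨ clipw ≥ width ∨ overlap < clipw))
instance (width : Int) (height : Int) (clipw : Int) (cliph : Int) (overlap : Int) : Decidable (Pre_get_cliplist width height clipw cliph overlap) := by unfold Pre_get_cliplist; infer_instance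
def pvWitness_get_cliplist : Int × Int × Int × Int × Int := (10, 10, 4, 4, 1)

def Spec_get_cliplist (width : Int) (height : Int) (clipw : Int) (cliph : Int) (overlap : Int) (out : List (List Int)) : Prop := out = get_cliplist_alt width height clipw cliph overlap
instance (width : Int) (height : Int) (clipw : Int) (cliph : Int) (overlap : Int) (out : List (List Int)) : Decidable (Spec_get_cliplist width height clipw cliph overlap out) := by unfold Spec_get_cliplist; infer_instance

-- ===== CLAIM (what is proved, stated in full; the proofs are below) =====
def Claim_equal_get_cliplist : Prop := ∀ (width : Int) (height : Int) (clipw : Int) (cliph : Int) (overlap : Int), Dom_get_cliplist width height clipw cliph overlap → Pre_get_cliplist width height clipw cliph overlap → Spec_get_cliplist width height clipw cliph overlap (get_cliplist width height clipw cliph overlap)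

-- ===== LEMMAS AND PROOFS =====

-- proof-only reference description of one axis: the intervals A's (and B's) axis produces,
-- written as a plain structural recursion with an iteration budget n
def spansFrom (length clip overlap : Int) : Nat → Int → List (Int × Int)
  | 0, _ => []
  | n + 1, s =>
    if s < length then
      if length ≤ s + clip then [(s, length)]
      else (s, s + clip) :: spansFrom length clip overlap n (s + (clip - overlap))
    else []

-- A's inner loop computes the width-axis spansFrom list (mapped to boxes, reversed onto acc)
theorem pvInnerA_eq (width clipw overlap sh eh : Int)
    (hW : width ≤ 0 ∨ clipw ≥ width ∨ 0 < clipw - overlap) :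
    ∀ (n f : Nat) (s : Int) (acc : List (List Int)), 0 ≤ s → (width - s).toNat < n → n ≤ f →
      pvInnerA width clipw overlap sh eh f s (s + clipw) acc
        = ((spansFrom width clipw overlap n s).map (fun q => [sh, eh, q.1, q.2])).reverse ++ acc := by
  intro n
  induction n with
  | zero => intro f s acc _ h _; omega
  | succ n ih =>
    intro f s acc hs hbud hf
    cases f with
    | zero => omega
    | succ f =>
      simp only [pvInnerA, spansFrom]
      by_cases hlt : s < width
      · rw [if_pos hlt, if_pos hlt]
        by_cases hcl : width ≤ s + clipw
        · have he' : (if s + clipw > width then width else s + clipw) = width := by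
            split_ifs <;> omega
          rw [he', if_pos rfl, if_pos hcl]
          simp
        · have hstep : 0 < clipw - overlap := by
            rcases hW with h | h | h
            · omega
            · omega
            · exact h
          have he' : (if s + clipw > width then width else s + clipw) = s + clipw := by
            split_ifs <;> omega
          rw [he', if_neg (by omega), if_neg (by omega)]
          have harg : s + clipw - overlap + clipw = (s + (clipw - overlap)) + clipw := by ring
          have harg2 : s + clipw - overlap = s + (clipw - overlap) := by ring
          rw [harg, harg2, ih f (s + (clipw - overlap)) _ (by omega) (by omega) (by omega)]
          simp
      · rw [if_neg hlt, if_neg hlt]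
        simp

-- A's outer loop computes the height-axis spansFrom list, flat-mapped over the row boxes
theorem pvOuterA_eq (width height clipw cliph overlap : Int)
    (hW : width ≤ 0 ∨ clipw ≥ width ∨ 0 < clipw - overlap)
    (hH : height ≤ 0 ∨ cliph ≥ height ∨ 0 < cliph - overlap)
    (hWfuel : width.toNat + 1 ≤ pvFuel) :
    ∀ (n f : Nat) (sh : Int) (acc : List (List Int)), 0 ≤ sh → (height - sh).toNat < n → n ≤ f →
      pvOuterA width height clipw cliph overlap f sh (sh + cliph) acc
        = ((spansFrom height cliph overlap n sh).flatMap (fun p =>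
            (spansFrom width clipw overlap (width.toNat + 1) 0).map
              (fun q => [p.1, p.2, q.1, q.2]))).reverse ++ acc := by
  intro n
  induction n with
  | zero => intro f sh acc _ h _; omega
  | succ n ih =>
    intro f sh acc hs hbud hf
    cases f with
    | zero => omega
    | succ f =>
      have hrhs : spansFrom height cliph overlap (n + 1) sh =
          (if sh < height then
            if height ≤ sh + cliph then [(sh, height)]
            else (sh, sh + cliph) :: spansFrom height cliph overlap n (sh + (cliph - overlap))
          else []) := rfl
      simp only [pvOuterA]
      rw [hrhs]
      by_cases hlt : sh < height
      · rw [if_pos hlt, if_pos hlt]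
        have hrow : ∀ (eh : Int) (acc0 : List (List Int)),
            pvInnerA width clipw overlap sh eh pvFuel 0 clipw acc0
              = ((spansFrom width clipw overlap (width.toNat + 1) 0).map
                  (fun q => [sh, eh, q.1, q.2])).reverse ++ acc0 := by
          intro eh acc0
          have := pvInnerA_eq width clipw overlap sh eh hW (width.toNat + 1) pvFuel 0 acc0
            (le_refl 0) (by omega) hWfuel
          simpa using this
        by_cases hcl : height ≤ sh + cliph
        · have he' : (if sh + cliph > height then height else sh + cliph) = height := by
            split_ifs <;> omega
          rw [he', if_pos rfl, if_pos hcl, hrow]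
          simp
        · have hstep : 0 < cliph - overlap := by
            rcases hH with h | h | h
            · omega
            · omega
            · exact h
          have he' : (if sh + cliph > height then height else sh + cliph) = sh + cliph := by
            split_ifs <;> omega
          rw [he', if_neg (show ¬ (sh + cliph = height) by omega), if_neg hcl, hrow]
          have harg : sh + cliph - overlap + cliph = (sh + (cliph - overlap)) + cliph := by ring
          have harg2 : sh + cliph - overlap = sh + (cliph - overlap) := by ring
          rw [harg, harg2, ih f (sh + (cliph - overlap)) _ (by omega) (by omega) (by omega)]
          simp
      · rw [if_neg hlt, if_neg hlt]
        simp

-- ceiling-division brackets for B's kb and kg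
theorem pvCeil_le_iff (a step i : Int) (hstep : 0 < step) :
    -(PySem.Int.floordiv (-a) step) ≤ i ↔ a ≤ i * step := by
  rw [neg_le, PySem.Int.le_floordiv_iff_mul_le hstep]
  constructor <;> intro h <;> nlinarith

-- the main closed-form case kb < kg: spansFrom is the range map plus the clamped tail
theorem spansFrom_closed_kb (length clip overlap : Int)
    (hstep : 0 < clip - overlap) (_hlen : 0 < length) (hclip : clip < length)
    (hkb : -(PySem.Int.floordiv (clip - length) (clip - overlap))
           < -(PySem.Int.floordiv (-length) (clip - overlap))) :
    ∀ (n i : Nat), (i : Int) ≤ -(PySem.Int.floordiv (clip - length) (clip - overlap)) →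
      (length - (i : Int) * (clip - overlap)).toNat < n →
      spansFrom length clip overlap n ((i : Int) * (clip - overlap))
        = ((List.range (-(PySem.Int.floordiv (clip - length) (clip - overlap))).toNat).drop i).map
            (fun j => ((j : Int) * (clip - overlap), (j : Int) * (clip - overlap) + clip))
          ++ [(-(PySem.Int.floordiv (clip - length) (clip - overlap)) * (clip - overlap), length)] := by
  set step := clip - overlap with hstepdef
  set kb := -(PySem.Int.floordiv (clip - length) step) with hkbdef
  set kg := -(PySem.Int.floordiv (-length) step) with hkgdef
  have hkbiff : ∀ i : Int, kb ≤ i ↔ length - clip ≤ i * step := by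
    intro i
    have := pvCeil_le_iff (length - clip) step i hstep
    rw [hkbdef]
    constructor <;> intro h
    · exact (this.mp (by rw [show -(length - clip) = clip - length by ring]; exact h))
    · have := this.mpr h
      rwa [show -(length - clip) = clip - length by ring] at this
  have hkgiff : ∀ i : Int, kg ≤ i ↔ length ≤ i * step := fun i => pvCeil_le_iff length step i hstep
  have hkb0 : 0 < kb := by
    by_contra h
    have := (hkbiff 0).mp (by omega)
    simp at this
    omega
  intro n
  induction n with
  | zero =>
    intro i hikb hbud
    exfalso
    have hik : (i : Int) < kg := lt_of_le_of_lt hikb hkb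
    have : ¬ length ≤ (i : Int) * step := fun h => absurd ((hkgiff _).mpr h) (by omega)
    omega
  | succ n ih =>
    intro i hikb hbud
    have hslt : (i : Int) * step < length := by
      have hik : (i : Int) < kg := lt_of_le_of_lt hikb hkb
      by_contra h
      exact absurd ((hkgiff (i : Int)).mpr (by omega)) (by omega)
    simp only [spansFrom, if_pos hslt]
    by_cases hend : length ≤ (i : Int) * step + clip
    · have hieq : (i : Int) = kb := le_antisymm hikb ((hkbiff _).mpr (by omega))
      rw [if_pos hend]
      have hdrop : (List.range kb.toNat).drop i = [] := by
        apply List.drop_eq_nil_of_le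
        simp
        omega
      rw [hdrop]
      simp [hieq]
    · have hikb' : (i : Int) < kb := by
        rcases lt_or_eq_of_le hikb with h | h
        · exact h
        · exact absurd ((hkbiff _).mp (le_of_eq h.symm)) (by omega)
      rw [if_neg hend]
      have harg : (i : Int) * step + step = ((i + 1 : Nat) : Int) * step := by
        push_cast; ring
      rw [show (i : Int) * step + (clip - overlap) = ((i + 1 : Nat) : Int) * step by
        rw [← harg, hstepdef]]
      rw [ih (i + 1) (by push_cast; omega) (by
        have h1 : ((i + 1 : Nat) : Int) * step = (i : Int) * step + step := by push_cast; ring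
        omega)]
      have hlen' : i < (List.range kb.toNat).length := by simp; omega
      rw [List.drop_eq_getElem_cons hlen']
      simp

-- the degenerate closed-form case kg ≤ kb: the loop exits by its guard, no clamped tile
theorem spansFrom_closed_kg (length clip overlap : Int)
    (hstep : 0 < clip - overlap) (_hlen : 0 < length) (_hclip : clip < length)
    (hkb : ¬ -(PySem.Int.floordiv (clip - length) (clip - overlap))
           < -(PySem.Int.floordiv (-length) (clip - overlap))) :
    ∀ (n i : Nat), (i : Int) ≤ -(PySem.Int.floordiv (-length) (clip - overlap)) →
      (length - (i : Int) * (clip - overlap)).toNat < n →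
      spansFrom length clip overlap n ((i : Int) * (clip - overlap))
        = ((List.range (-(PySem.Int.floordiv (-length) (clip - overlap))).toNat).drop i).map
            (fun j => ((j : Int) * (clip - overlap), (j : Int) * (clip - overlap) + clip)) := by
  set step := clip - overlap with hstepdef
  set kb := -(PySem.Int.floordiv (clip - length) step) with hkbdef
  set kg := -(PySem.Int.floordiv (-length) step) with hkgdef
  have hkbiff : ∀ i : Int, kb ≤ i ↔ length - clip ≤ i * step := by
    intro i
    have := pvCeil_le_iff (length - clip) step i hstep
    rw [hkbdef]
    constructor <;> intro h
    · exact (this.mp (by rw [show -(length - clip) = clip - length by ring]; exact h))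
    · have := this.mpr h
      rwa [show -(length - clip) = clip - length by ring] at this
  have hkgiff : ∀ i : Int, kg ≤ i ↔ length ≤ i * step := fun i => pvCeil_le_iff length step i hstep
  intro n
  induction n with
  | zero =>
    intro i hikg hbud
    rcases lt_or_eq_of_le hikg with h | h
    · exfalso
      have : ¬ length ≤ (i : Int) * step := fun hx => absurd ((hkgiff _).mpr hx) (by omega)
      omega
    · exfalso
      have : length ≤ (i : Int) * step := (hkgiff _).mp (le_of_eq h.symm)
      omega
  | succ n ih =>
    intro i hikg hbud
    rcases lt_or_eq_of_le hikg with hik | hieq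
    · have hslt : (i : Int) * step < length := by
        by_contra h
        exact absurd ((hkgiff (i : Int)).mpr (by omega)) (by omega)
      have hend : ¬ length ≤ (i : Int) * step + clip := by
        intro h
        have : kb ≤ (i : Int) := (hkbiff _).mpr (by omega)
        omega
      simp only [spansFrom, if_pos hslt, if_neg hend]
      rw [show (i : Int) * step + (clip - overlap) = ((i + 1 : Nat) : Int) * step by
        push_cast; rw [hstepdef]; ring]
      rw [ih (i + 1) (by push_cast; omega) (by
        have h1 : ((i + 1 : Nat) : Int) * step = (i : Int) * step + step := by push_cast; ring
        omega)]
      have hlen' : i < (List.range kg.toNat).length := by simp; omega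
      rw [List.drop_eq_getElem_cons hlen']
      simp
    · have hslt : ¬ (i : Int) * step < length := by
        have : length ≤ (i : Int) * step := (hkgiff _).mp (le_of_eq hieq.symm)
        omega
      simp only [spansFrom, if_neg hslt]
      rw [List.drop_eq_nil_of_le (by simp; omega)]
      simp

-- one axis: the spansFrom description equals B's closed-form pvSpans
theorem spansFrom_eq_pvSpans (length clip overlap : Int)
    (hAx : length ≤ 0 ∨ clip ≥ length ∨ 0 < clip - overlap)
    (n : Nat) (hn : length.toNat < n) :
    spansFrom length clip overlap n 0 = pvSpans length clip overlap := by
  cases n with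
  | zero => omega
  | succ n =>
    by_cases hlen : length ≤ 0
    · simp only [spansFrom, pvSpans, if_pos hlen, if_neg (by omega : ¬ (0 : Int) < length)]
    · by_cases hclip : clip ≥ length
      · simp only [spansFrom, pvSpans, if_neg hlen, if_pos hclip,
          if_pos (by omega : (0 : Int) < length), if_pos (by omega : length ≤ 0 + clip)]
      · have hstep : 0 < clip - overlap := by
          rcases hAx with h | h | h
          · omega
          · omega
          · exact h
        have h0 : ((0 : Nat) : Int) * (clip - overlap) = 0 := by simp
        by_cases hkb : -(PySem.Int.floordiv (clip - length) (clip - overlap))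
            < -(PySem.Int.floordiv (-length) (clip - overlap))
        · have := spansFrom_closed_kb length clip overlap hstep (by omega) (by omega) hkb
            (n + 1) 0 (by
              simp only [Nat.cast_zero]
              have := (pvCeil_le_iff (length - clip) (clip - overlap) (-1) hstep)
              by_contra h
              push_neg at h
              have h2 : -(PySem.Int.floordiv (clip - length) (clip - overlap)) ≤ -1 := by omega
              have := (by
                rw [show -(length - clip) = clip - length by ring] at this
                exact this.mp h2)
              nlinarith) (by omega)
          rw [h0] at this
          rw [this]
          simp only [pvSpans, if_neg hlen, if_neg hclip, if_neg (by omega : ¬ clip - overlap ≤ 0),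
            if_pos hkb]
          simp
        · have := spansFrom_closed_kg length clip overlap hstep (by omega) (by omega) hkb
            (n + 1) 0 (by
              simp only [Nat.cast_zero]
              have := (pvCeil_le_iff length (clip - overlap) (-1) hstep)
              by_contra h
              push_neg at h
              have h2 : -(PySem.Int.floordiv (-length) (clip - overlap)) ≤ -1 := by omega
              have := this.mp h2
              nlinarith) (by omega)
          rw [h0] at this
          rw [this]
          simp only [pvSpans, if_neg hlen, if_neg hclip, if_neg (by omega : ¬ clip - overlap ≤ 0),
            if_neg hkb]
          simp

-- the outer loop with a spent guard returns its accumulator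
theorem pvOuterA_nil (width height clipw cliph overlap : Int) (f : Nat) (sh eh : Int)
    (acc : List (List Int)) (hh : ¬ sh < height) :
    pvOuterA width height clipw cliph overlap (f + 1) sh eh acc = acc := by
  simp only [pvOuterA, if_neg hh]

-- ===== VERDICT (by name: the statement is the Claim_ definition above) =====
theorem get_cliplist_spec : Claim_equal_get_cliplist := by
  intro width height clipw cliph overlap hDom hPre
  unfold Spec_get_cliplist get_cliplist get_cliplist_alt
  have hDom' := hDom
  unfold Dom_get_cliplist pvDomInt at hDom'
  simp only [Bool.and_eq_true, decide_eq_true_eq] at hDom'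
  by_cases hh : height ≤ 0
  · have hfuel : pvFuel = 1099511627775 + 1 := by norm_num [pvFuel]
    rw [hfuel, pvOuterA_nil width height clipw cliph overlap 1099511627775 0 cliph []
      (by omega)]
    simp [pvSpans, hh]
  · rcases hPre with h | ⟨hH2, hW2⟩
    · omega
    · have hW : width ≤ 0 ∨ clipw ≥ width ∨ 0 < clipw - overlap := by
        rcases hW2 with h | h | h
        · exact Or.inl h
        · exact Or.inr (Or.inl h)
        · exact Or.inr (Or.inr (by omega))
      have hH : height ≤ 0 ∨ cliph ≥ height ∨ 0 < cliph - overlap := by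
        rcases hH2 with h | h
        · exact Or.inr (Or.inl h)
        · exact Or.inr (Or.inr (by omega))
      have hWfuel : width.toNat + 1 ≤ pvFuel := by
        unfold pvFuel; omega
      have houter := pvOuterA_eq width height clipw cliph overlap hW hH hWfuel
        (height.toNat + 1) pvFuel 0 [] (le_refl 0) (by omega) (by unfold pvFuel; omega)
      rw [zero_add] at houter
      rw [houter]
      rw [spansFrom_eq_pvSpans height cliph overlap hH (height.toNat + 1) (by omega),
          spansFrom_eq_pvSpans width clipw overlap hW (width.toNat + 1) (by omega)]
      simp
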